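-- pv_equiv track=rewrite | github.com/jimjimxxx/Game_Candycrush | main.py | has_one_step_match
-- ===== SOURCE A (Python) =====
-- def has_one_step_match(board):
--     rows = len(board)
--     cols = len(board[0])
--
--     for row in range(rows):
--         for col in range(cols):
--             # 嘗試上下左右四個方向進行交換
--             for dr, dc in [(-1, 0), (1, 0), (0, -1), (0, 1)]:
--                 new_row = row + dr
--                 new_col = col + dc
--
--                 # 檢查新的位置是否在合法的範圍內
--                 if new_row >= 0 and new_row < rows and new_col >= 0 and new_col < cols:
--                     # 交換兩個單元格的值
--                     board[row][col], board[new_row][new_col] = board[new_row][new_col], board[row][col]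
--
--                     # 檢查交換後的棋盤是否有可消除的糖果
--                     matched_candies = check_matched_candies(board)
--
--                     # 恢復原始的單元格值
--                     board[row][col], board[new_row][new_col] = board[new_row][new_col], board[row][col]
--
--                     # 如果有可消除的糖果，返回 True
--                     if len(matched_candies) > 0:
--                         return True
--
--     # 如果遍歷完整個棋盤都沒有找到可消除的糖果，返回 False
--     return False
--
-- def check_matched_candies(board):
--     rows = len(board)
--     cols = len(board[0])
--     matched_candies = []
--
--     # 檢查橫向連線
--     for row in range(rows):
--         for col in range(cols - 2):
--             if board[row][col] == board[row][col + 1] == board[row][col + 2]: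
--                 matched_candies.append((row, col))
--                 matched_candies.append((row, col + 1))
--                 matched_candies.append((row, col + 2))
--                 if col + 3 < cols:
--                     for k in range(cols + 3, cols):
--                         if board[row][k] == board[row][k - 1]:
--                             matched_candies.append(row, k)
--                         else:
--                             break
--
--     # 檢查縱向連線
--     for col in range(cols):
--         for row in range(rows - 2):
--             if board[row][col] == board[row + 1][col] == board[row + 2][col]:
--                 matched_candies.append((row, col))
--                 matched_candies.append((row + 1, col))
--                 matched_candies.append((row + 2, col))
--                 if row + 3 < rows:
--                     for k in range(row + 3, rows):
--                         if board[k][col] == board[k - 1][col]: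
--                             matched_candies.append((k, col))
--                         else:
--                             break
--     matched_candies = set(matched_candies)  # 要被消除的糖果
--
--     return matched_candies  # 返回可消除糖果的列表
-- ===== SOURCE B (Python) =====
-- def has_one_step_match(board):
--     rows = len(board)
--     cols = len(board[0])
--     # A pre-existing 3-in-a-row: swapping two equal adjacent cells inside it leaves
--     # the board unchanged, so A reports True; we can answer True immediately.
--     for r in range(rows):
--         for c in range(cols - 2):
--             if board[r][c] == board[r][c + 1] == board[r][c + 2]:
--                 return True
--     for c in range(cols):
--         for r in range(rows - 2):
--             if board[r][c] == board[r + 1][c] == board[r + 2][c]: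
--                 return True
--
--     # No pre-existing match: a match created by a swap must run through a swapped
--     # cell, so only the O(1) windows around the two cells need to be checked.
--     def cell(r, c, pr, pc, qr, qc):
--         # value at (r, c) after swapping (pr, pc) with (qr, qc)
--         if r == pr and c == pc:
--             return board[qr][qc]
--         if r == qr and c == qc:
--             return board[pr][pc]
--         return board[r][c]
--
--     def creates(pr, pc, qr, qc):
--         for (r, c) in ((pr, pc), (qr, qc)):
--             for c0 in range(max(0, c - 2), c + 1):
--                 if c0 + 2 < cols and cell(r, c0, pr, pc, qr, qc) == cell(r, c0 + 1, pr, pc, qr, qc) == cell(r, c0 + 2, pr, pc, qr, qc):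
--                     return True
--             for r0 in range(max(0, r - 2), r + 1):
--                 if r0 + 2 < rows and cell(r0, c, pr, pc, qr, qc) == cell(r0 + 1, c, pr, pc, qr, qc) == cell(r0 + 2, c, pr, pc, qr, qc):
--                     return True
--         return False
--
--     for r in range(rows):
--         for c in range(cols):
--             if c + 1 < cols and creates(r, c, r, c + 1):
--                 return True
--             if r + 1 < rows and creates(r, c, r + 1, c):
--                 return True
--     return False
-- ===== Notes on version B (the rewrite author's own statement) =====
-- stated objective: faster
-- what changed: A re-scans the whole board for matches after every one of the ~4*R*C trial swaps; B first scans once for a pre-existing 3-in-a-row (any such board is a trivial yes, since swapping two equal adjacent cells inside it changes nothing) and otherwise checks, for each of the ~2*R*C deduplicated adjacent swaps, only the O(1) windows running through the two swapped cells.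
-- outside the precondition, e.g. on has_one_step_match([[1, 0, 0], [0, 0]]): A returns True, B raises IndexError
import Mathlib
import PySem

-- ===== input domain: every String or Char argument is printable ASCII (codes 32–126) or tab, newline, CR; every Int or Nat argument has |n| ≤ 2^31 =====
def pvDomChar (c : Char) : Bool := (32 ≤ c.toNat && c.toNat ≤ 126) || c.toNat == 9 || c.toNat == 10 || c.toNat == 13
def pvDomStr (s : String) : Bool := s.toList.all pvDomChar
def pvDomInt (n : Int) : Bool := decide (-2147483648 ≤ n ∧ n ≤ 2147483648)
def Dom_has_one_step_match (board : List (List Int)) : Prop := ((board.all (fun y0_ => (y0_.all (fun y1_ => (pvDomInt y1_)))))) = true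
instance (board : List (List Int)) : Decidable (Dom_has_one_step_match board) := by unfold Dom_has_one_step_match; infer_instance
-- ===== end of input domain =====

-- B answers the same question as A (does some adjacent swap leave a 3-in-a-row on the board?)
-- but avoids A's full-board rescan after every trial swap.  A temporarily mutates `board` and
-- restores it before returning, so the caller observes no net mutation; the equivalence below
-- is about the return value.

-- ===== PORT A =====

-- board[r][c]; exact for in-range indices, which every access under Pre_ is
def pvGetA (b : List (List Int)) (r c : Nat) : Int := (b.getD r []).getD c 0

-- the simultaneous assignment  board[r][c], board[nr][nc] = board[nr][nc], board[r][c] :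
-- both right-hand values are read first, then the two cells are written in order
def pvSwap (b : List (List Int)) (r c nr nc : Nat) : List (List Int) :=
  let v1 := pvGetA b nr nc
  let v2 := pvGetA b r c
  let b1 := b.set r ((b.getD r []).set c v1)
  b1.set nr ((b1.getD nr []).set nc v2)

-- the vertical extension loop `for k in range(row+3, rows): … else: break` of check_matched_candies
def pvExtV (b : List (List Int)) (col : Nat) : List Nat → List (Int × Int)
  | [] => []
  | k :: rest =>
    if pvGetA b k col == pvGetA b (k - 1) col then
      ((k : Int), (col : Int)) :: pvExtV b col rest
    else []

def check_matched_candies (b : List (List Int)) : List (Int × Int) :=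
  let rows := b.length
  let cols := (b.headD []).length
  let horiz := (List.range rows).flatMap fun row =>
    (List.range (cols - 2)).flatMap fun col =>
      if pvGetA b row col == pvGetA b row (col + 1) && pvGetA b row (col + 1) == pvGetA b row (col + 2) then
        -- the inner `for k in range(cols + 3, cols)` loop iterates over an empty range for every cols
        [((row : Int), (col : Int)), ((row : Int), ((col : Nat) + 1 : Nat)), ((row : Int), ((col : Nat) + 2 : Nat))]
      else []
  let vert := (List.range cols).flatMap fun col =>
    (List.range (rows - 2)).flatMap fun row =>
      if pvGetA b row col == pvGetA b (row + 1) col && pvGetA b (row + 1) col == pvGetA b (row + 2) col then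
        [((row : Int), (col : Int)), (((row : Nat) + 1 : Nat), (col : Int)), (((row : Nat) + 2 : Nat), (col : Int))] ++
          (if row + 3 < rows then pvExtV b col (List.range' (row + 3) (rows - (row + 3))) else [])
      else []
  PySem.Set.ofList (horiz ++ vert)

def has_one_step_match (board : List (List Int)) : Bool :=
  let rows := board.length
  let cols := (board.headD []).length
  (List.range rows).any fun row =>
    (List.range cols).any fun col =>
      ([((-1 : Int), (0 : Int)), (1, 0), (0, -1), (0, 1)]).any fun d =>
        let nr : Int := (row : Int) + d.1
        let nc : Int := (col : Int) + d.2
        if 0 ≤ nr ∧ nr < (rows : Int) ∧ 0 ≤ nc ∧ nc < (cols : Int) then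
          decide (0 < (check_matched_candies (pvSwap board row col nr.toNat nc.toNat)).length)
        else false

-- ===== PORT B =====

-- board[r][c]; exact for in-range indices, which every access under Pre_ is
def pvAt (b : List (List Int)) (r c : Nat) : Int := (b.getD r []).getD c 0

-- value at (r, c) after swapping (pr, pc) with (qr, qc)
def pvCell (b : List (List Int)) (r c pr pc qr qc : Nat) : Int :=
  if r = pr ∧ c = pc then pvAt b qr qc
  else if r = qr ∧ c = qc then pvAt b pr pc
  else pvAt b r c

-- does swapping (pr, pc) with (qr, qc) leave a 3-in-a-row through one of the two cells?
def pvCreates (b : List (List Int)) (rows cols pr pc qr qc : Nat) : Bool :=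
  [(pr, pc), (qr, qc)].any fun rc =>
    ((List.range' (rc.2 - 2) (rc.2 + 1 - (rc.2 - 2))).any fun c0 =>
      decide (c0 + 2 < cols) &&
        (pvCell b rc.1 c0 pr pc qr qc == pvCell b rc.1 (c0 + 1) pr pc qr qc &&
         pvCell b rc.1 (c0 + 1) pr pc qr qc == pvCell b rc.1 (c0 + 2) pr pc qr qc)) ||
    ((List.range' (rc.1 - 2) (rc.1 + 1 - (rc.1 - 2))).any fun r0 =>
      decide (r0 + 2 < rows) &&
        (pvCell b r0 rc.2 pr pc qr qc == pvCell b (r0 + 1) rc.2 pr pc qr qc &&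
         pvCell b (r0 + 1) rc.2 pr pc qr qc == pvCell b (r0 + 2) rc.2 pr pc qr qc))

def has_one_step_match_alt (board : List (List Int)) : Bool :=
  let rows := board.length
  let cols := (board.headD []).length
  ((List.range rows).any fun r => (List.range (cols - 2)).any fun c =>
      pvAt board r c == pvAt board r (c + 1) && pvAt board r (c + 1) == pvAt board r (c + 2)) ||
  ((List.range cols).any fun c => (List.range (rows - 2)).any fun r =>
      pvAt board r c == pvAt board (r + 1) c && pvAt board (r + 1) c == pvAt board (r + 2) c) ||
  ((List.range rows).any fun r => (List.range cols).any fun c =>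
      (decide (c + 1 < cols) && pvCreates board rows cols r c r (c + 1)) ||
      (decide (r + 1 < rows) && pvCreates board rows cols r c (r + 1) c))

-- ===== PRECONDITION & SPEC =====

-- Pre_ excludes the empty board (A's `board[0]` raises IndexError) and ragged boards with a row
-- shorter than row 0: there indexing past the short row raises IndexError unless the chained
-- comparison happens to short-circuit first, an accident of scan order on which A may return a
-- value while the natural B raises (where both return, they agree).
def Pre_has_one_step_match (board : List (List Int)) : Prop :=
  board ≠ [] ∧ ∀ row ∈ board, (board.headD []).length ≤ row.length

instance (board : List (List Int)) : Decidable (Pre_has_one_step_match board) := by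
  unfold Pre_has_one_step_match; infer_instance

def pvWitness_has_one_step_match : List (List Int) := [[1, 2], [2, 1]]

def Spec_has_one_step_match (board : List (List Int)) (out : Bool) : Prop := out = has_one_step_match_alt board
instance (board : List (List Int)) (out : Bool) : Decidable (Spec_has_one_step_match board out) := by unfold Spec_has_one_step_match; infer_instance

-- ===== CLAIM (what is proved, stated in full; the proofs are below) =====
def Claim_equal_has_one_step_match : Prop := ∀ (board : List (List Int)), Dom_has_one_step_match board → Pre_has_one_step_match board → Spec_has_one_step_match board (has_one_step_match board)

-- ===== LEMMAS AND PROOFS =====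

-- getD through set, fully general
lemma getD_set {a : Type} (l : List a) (i j : Nat) (x d : a) :
    (l.set i x).getD j d = if i = j ∧ j < l.length then x else l.getD j d := by
  rcases eq_or_ne i j with rfl | hne
  · by_cases h : i < l.length
    · simp [List.getD_eq_getElem?_getD, h]
    · simp [List.getD_eq_getElem?_getD, h]
  · simp [List.getD_eq_getElem?_getD, hne]

-- set a cell to its own value: no change
lemma set_getD_self {a : Type} (l : List a) (i : Nat) (d : a) (_h : i < l.length) :
    l.set i (l.getD i d) = l := by
  apply List.ext_getElem
  · simp
  · intro j h1 h2
    rw [List.getElem_set]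
    split
    · next heq => subst heq; rw [List.getD_eq_getElem l d h2]
    · rfl

lemma headD_eq_getD {a : Type} (l : List a) (d : a) : l.headD d = l.getD 0 d := by
  cases l <;> rfl

-- "the board has a 3-in-a-row", relative to row/column counts R, C
def pvHM (b : List (List Int)) (R C : Nat) : Prop :=
  (∃ r, r < R ∧ ∃ c, c + 2 < C ∧
     pvGetA b r c = pvGetA b r (c + 1) ∧ pvGetA b r (c + 1) = pvGetA b r (c + 2)) ∨
  (∃ c, c < C ∧ ∃ r, r + 2 < R ∧
     pvGetA b r c = pvGetA b (r + 1) c ∧ pvGetA b (r + 1) c = pvGetA b (r + 2) c)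

-- "some 3-in-a-row of the swapped board runs through a swapped cell" (prop form of pvCreates)
def pvCW (b : List (List Int)) (R C pr pc qr qc : Nat) : Prop :=
  ∃ a ∈ [(pr, pc), (qr, qc)],
    (∃ c0, a.2 ≤ c0 + 2 ∧ c0 ≤ a.2 ∧ c0 + 2 < C ∧
       pvCell b a.1 c0 pr pc qr qc = pvCell b a.1 (c0 + 1) pr pc qr qc ∧
       pvCell b a.1 (c0 + 1) pr pc qr qc = pvCell b a.1 (c0 + 2) pr pc qr qc) ∨
    (∃ r0, a.1 ≤ r0 + 2 ∧ r0 ≤ a.1 ∧ r0 + 2 < R ∧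
       pvCell b r0 a.2 pr pc qr qc = pvCell b (r0 + 1) a.2 pr pc qr qc ∧
       pvCell b (r0 + 1) a.2 pr pc qr qc = pvCell b (r0 + 2) a.2 pr pc qr qc)

lemma check_pos_iff (b : List (List Int)) :
    0 < (check_matched_candies b).length ↔ pvHM b b.length (b.headD []).length := by
  rw [List.length_pos_iff_exists_mem]
  simp only [check_matched_candies, PySem.Set.mem_ofList, List.mem_append, List.mem_flatMap,
    List.mem_range]
  constructor
  · rintro ⟨x, ⟨row, hrow, col, hcol, hmem⟩ | ⟨col, hcol, row, hrow, hmem⟩⟩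
    · by_cases hcond : (pvGetA b row col == pvGetA b row (col + 1) &&
          (pvGetA b row (col + 1) == pvGetA b row (col + 2))) = true
      · simp only [Bool.and_eq_true, beq_iff_eq] at hcond
        exact Or.inl ⟨row, hrow, col, by omega, hcond.1, hcond.2⟩
      · rw [if_neg hcond] at hmem; simp at hmem
    · by_cases hcond : (pvGetA b row col == pvGetA b (row + 1) col &&
          (pvGetA b (row + 1) col == pvGetA b (row + 2) col)) = true
      · simp only [Bool.and_eq_true, beq_iff_eq] at hcond
        exact Or.inr ⟨col, hcol, row, by omega, hcond.1, hcond.2⟩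
      · rw [if_neg hcond] at hmem; simp at hmem
  · rintro (⟨r, hr, c, hc, h1, h2⟩ | ⟨c, hc, r, hr, h1, h2⟩)
    · refine ⟨((r : Int), (c : Int)), Or.inl ⟨r, hr, c, by omega, ?_⟩⟩
      rw [if_pos (by simp [h1, h2])]
      simp
    · refine ⟨((r : Int), (c : Int)), Or.inr ⟨c, hc, r, by omega, ?_⟩⟩
      rw [if_pos (by simp [h1, h2])]
      simp

lemma pvSwap_length (b : List (List Int)) (r c nr nc : Nat) :
    (pvSwap b r c nr nc).length = b.length := by
  simp [pvSwap]

lemma pvSwap_row_length (b : List (List Int)) (r c nr nc j : Nat) :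
    ((pvSwap b r c nr nc).getD j []).length = (b.getD j []).length := by
  simp only [pvSwap]
  rw [getD_set]
  split_ifs with h1
  · rw [List.length_set, getD_set]
    split_ifs with h2
    · rw [List.length_set]; rcases h2 with ⟨rfl, _⟩; rcases h1 with ⟨rfl, _⟩; rfl
    · rcases h1 with ⟨rfl, _⟩; rfl
  · rw [getD_set]
    split_ifs with h2
    · rw [List.length_set]; rcases h2 with ⟨rfl, _⟩; rfl
    · rfl

lemma pvSwap_head_length (b : List (List Int)) (r c nr nc : Nat) :
    ((pvSwap b r c nr nc).headD []).length = (b.headD []).length := by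
  rw [headD_eq_getD, headD_eq_getD, pvSwap_row_length]

-- one cell overwritten: what reads become
lemma set_cell_get (b : List (List Int)) (i k : Nat) (v : Int)
    (hi : i < b.length) (hk : k < (b.getD i []).length) (r c : Nat) :
    pvGetA (b.set i ((b.getD i []).set k v)) r c =
      if r = i ∧ c = k then v else pvGetA b r c := by
  unfold pvGetA
  rw [getD_set]
  by_cases h1 : i = r
  · subst h1
    rw [if_pos ⟨rfl, hi⟩, getD_set]
    split_ifs with h2 h3 h3
    · rfl
    · omega
    · omega
    · rfl
  · rw [if_neg (by tauto), if_neg (by tauto)]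

lemma pre_row_len (b : List (List Int)) (hpre : Pre_has_one_step_match b)
    (j : Nat) (hj : j < b.length) : (b.headD []).length ≤ (b.getD j []).length := by
  refine hpre.2 _ ?_
  rw [List.getD_eq_getElem b [] hj]
  exact List.getElem_mem hj

-- reading the swapped board, inside the box, is pvCell
lemma pvSwap_get (b : List (List Int)) (pr pc qr qc r c : Nat)
    (hpre : Pre_has_one_step_match b)
    (hpr : pr < b.length) (hpc : pc < (b.headD []).length)
    (hqr : qr < b.length) (hqc : qc < (b.headD []).length)
    (hne : (pr, pc) ≠ (qr, qc)) :
    pvGetA (pvSwap b pr pc qr qc) r c = pvCell b r c pr pc qr qc := by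
  have hlp : pc < (b.getD pr []).length := lt_of_lt_of_le hpc (pre_row_len b hpre pr hpr)
  have hlq : qc < (b.getD qr []).length := lt_of_lt_of_le hqc (pre_row_len b hpre qr hqr)
  have hb1len : (b.set pr ((b.getD pr []).set pc (pvGetA b qr qc))).length = b.length := by
    simp
  have hb1row : ((b.set pr ((b.getD pr []).set pc (pvGetA b qr qc))).getD qr []).length =
      (b.getD qr []).length := by
    rw [getD_set]
    split_ifs with h
    · rcases h with ⟨rfl, _⟩; simp
    · rfl
  simp only [pvSwap]
  rw [set_cell_get _ qr qc _ (by rw [hb1len]; exact hqr) (by rw [hb1row]; exact hlq)]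
  rw [set_cell_get _ pr pc _ hpr hlp]
  by_cases h2 : r = qr ∧ c = qc
  · rw [if_pos h2]
    rcases h2 with ⟨rfl, rfl⟩
    have hne2 : ¬ (r = pr ∧ c = pc) := by
      intro h; exact hne (by rcases h with ⟨rfl, rfl⟩; rfl)
    unfold pvCell
    rw [if_neg (by tauto), if_pos ⟨rfl, rfl⟩]
    rfl
  · rw [if_neg h2]
    by_cases h1 : r = pr ∧ c = pc
    · rw [if_pos h1]
      rcases h1 with ⟨rfl, rfl⟩
      unfold pvCell
      rw [if_pos ⟨rfl, rfl⟩]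
      rfl
    · rw [if_neg h1]
      unfold pvCell
      rw [if_neg (by tauto), if_neg (by tauto)]
      rfl

def pvChk (b : List (List Int)) : Prop := 0 < (check_matched_candies b).length

lemma pvIte_true_iff (P Q : Prop) [Decidable P] [Decidable Q] :
    ((if P then decide Q else false) = true) ↔ P ∧ Q := by
  split_ifs with h <;> simp [h]

lemma A_iff (b : List (List Int)) :
    has_one_step_match b = true ↔
      ∃ r, r < b.length ∧ ∃ c, c < (b.headD []).length ∧
        ((1 ≤ r ∧ pvChk (pvSwap b r c (r - 1) c)) ∨
         (r + 1 < b.length ∧ pvChk (pvSwap b r c (r + 1) c)) ∨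
         (1 ≤ c ∧ pvChk (pvSwap b r c r (c - 1))) ∨
         (c + 1 < (b.headD []).length ∧ pvChk (pvSwap b r c r (c + 1)))) := by
  simp only [has_one_step_match, List.any_eq_true, List.mem_range, List.mem_cons,
    List.not_mem_nil, or_false]
  constructor
  · rintro ⟨r, hr, c, hc, d, hd, hcond⟩
    refine ⟨r, hr, c, hc, ?_⟩
    rcases hd with rfl | rfl | rfl | rfl
    · rw [pvIte_true_iff] at hcond
      have hP : 0 ≤ (r : Int) + (-1) ∧ (r : Int) + (-1) < (b.length : Int) ∧
          0 ≤ (c : Int) + 0 ∧ (c : Int) + 0 < ((b.headD []).length : Int) := hcond.1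
      have hQ : 0 < (check_matched_candies
          (pvSwap b r c (((r : Int) + (-1)).toNat) (((c : Int) + 0).toNat))).length := hcond.2
      rw [show ((r : Int) + (-1)).toNat = r - 1 from by omega,
          show ((c : Int) + 0).toNat = c from by omega] at hQ
      exact Or.inl ⟨by omega, hQ⟩
    · rw [pvIte_true_iff] at hcond
      have hP : 0 ≤ (r : Int) + 1 ∧ (r : Int) + 1 < (b.length : Int) ∧
          0 ≤ (c : Int) + 0 ∧ (c : Int) + 0 < ((b.headD []).length : Int) := hcond.1
      have hQ : 0 < (check_matched_candies
          (pvSwap b r c (((r : Int) + 1).toNat) (((c : Int) + 0).toNat))).length := hcond.2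
      rw [show ((r : Int) + 1).toNat = r + 1 from by omega,
          show ((c : Int) + 0).toNat = c from by omega] at hQ
      exact Or.inr (Or.inl ⟨by omega, hQ⟩)
    · rw [pvIte_true_iff] at hcond
      have hP : 0 ≤ (r : Int) + 0 ∧ (r : Int) + 0 < (b.length : Int) ∧
          0 ≤ (c : Int) + (-1) ∧ (c : Int) + (-1) < ((b.headD []).length : Int) := hcond.1
      have hQ : 0 < (check_matched_candies
          (pvSwap b r c (((r : Int) + 0).toNat) (((c : Int) + (-1)).toNat))).length := hcond.2
      rw [show ((r : Int) + 0).toNat = r from by omega,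
          show ((c : Int) + (-1)).toNat = c - 1 from by omega] at hQ
      exact Or.inr (Or.inr (Or.inl ⟨by omega, hQ⟩))
    · rw [pvIte_true_iff] at hcond
      have hP : 0 ≤ (r : Int) + 0 ∧ (r : Int) + 0 < (b.length : Int) ∧
          0 ≤ (c : Int) + 1 ∧ (c : Int) + 1 < ((b.headD []).length : Int) := hcond.1
      have hQ : 0 < (check_matched_candies
          (pvSwap b r c (((r : Int) + 0).toNat) (((c : Int) + 1).toNat))).length := hcond.2
      rw [show ((r : Int) + 0).toNat = r from by omega,
          show ((c : Int) + 1).toNat = c + 1 from by omega] at hQ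
      exact Or.inr (Or.inr (Or.inr ⟨by omega, hQ⟩))
  · rintro ⟨r, hr, c, hc, ⟨h1, h2⟩ | ⟨h1, h2⟩ | ⟨h1, h2⟩ | ⟨h1, h2⟩⟩
    · refine ⟨r, hr, c, hc, ((-1 : Int), (0 : Int)), Or.inl rfl, ?_⟩
      rw [pvIte_true_iff]
      constructor
      · show 0 ≤ (r : Int) + (-1) ∧ (r : Int) + (-1) < (b.length : Int) ∧
            0 ≤ (c : Int) + 0 ∧ (c : Int) + 0 < ((b.headD []).length : Int)
        refine ⟨by omega, by omega, by omega, by omega⟩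
      · show 0 < (check_matched_candies
            (pvSwap b r c (((r : Int) + (-1)).toNat) (((c : Int) + 0).toNat))).length
        rw [show ((r : Int) + (-1)).toNat = r - 1 from by omega,
            show ((c : Int) + 0).toNat = c from by omega]
        exact h2
    · refine ⟨r, hr, c, hc, ((1 : Int), (0 : Int)), Or.inr (Or.inl rfl), ?_⟩
      rw [pvIte_true_iff]
      constructor
      · show 0 ≤ (r : Int) + 1 ∧ (r : Int) + 1 < (b.length : Int) ∧
            0 ≤ (c : Int) + 0 ∧ (c : Int) + 0 < ((b.headD []).length : Int)
        refine ⟨by omega, by omega, by omega, by omega⟩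
      · show 0 < (check_matched_candies
            (pvSwap b r c (((r : Int) + 1).toNat) (((c : Int) + 0).toNat))).length
        rw [show ((r : Int) + 1).toNat = r + 1 from by omega,
            show ((c : Int) + 0).toNat = c from by omega]
        exact h2
    · refine ⟨r, hr, c, hc, ((0 : Int), (-1 : Int)), Or.inr (Or.inr (Or.inl rfl)), ?_⟩
      rw [pvIte_true_iff]
      constructor
      · show 0 ≤ (r : Int) + 0 ∧ (r : Int) + 0 < (b.length : Int) ∧
            0 ≤ (c : Int) + (-1) ∧ (c : Int) + (-1) < ((b.headD []).length : Int)
        refine ⟨by omega, by omega, by omega, by omega⟩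
      · show 0 < (check_matched_candies
            (pvSwap b r c (((r : Int) + 0).toNat) (((c : Int) + (-1)).toNat))).length
        rw [show ((r : Int) + 0).toNat = r from by omega,
            show ((c : Int) + (-1)).toNat = c - 1 from by omega]
        exact h2
    · refine ⟨r, hr, c, hc, ((0 : Int), (1 : Int)), Or.inr (Or.inr (Or.inr rfl)), ?_⟩
      rw [pvIte_true_iff]
      constructor
      · show 0 ≤ (r : Int) + 0 ∧ (r : Int) + 0 < (b.length : Int) ∧
            0 ≤ (c : Int) + 1 ∧ (c : Int) + 1 < ((b.headD []).length : Int)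
        refine ⟨by omega, by omega, by omega, by omega⟩
      · show 0 < (check_matched_candies
            (pvSwap b r c (((r : Int) + 0).toNat) (((c : Int) + 1).toNat))).length
        rw [show ((r : Int) + 0).toNat = r from by omega,
            show ((c : Int) + 1).toNat = c + 1 from by omega]
        exact h2

lemma creates_iff (b : List (List Int)) (R C pr pc qr qc : Nat) :
    pvCreates b R C pr pc qr qc = true ↔ pvCW b R C pr pc qr qc := by
  simp only [pvCreates, pvCW, List.any_eq_true, Bool.or_eq_true, Bool.and_eq_true,
    decide_eq_true_eq, beq_iff_eq, List.mem_range'_1]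
  constructor
  · rintro ⟨a, ha, h⟩
    refine ⟨a, ha, ?_⟩
    rcases h with ⟨c0, hc0, hlt, he1, he2⟩ | ⟨r0, hr0, hlt, he1, he2⟩
    · exact Or.inl ⟨c0, by omega, by omega, hlt, he1, he2⟩
    · exact Or.inr ⟨r0, by omega, by omega, hlt, he1, he2⟩
  · rintro ⟨a, ha, h⟩
    refine ⟨a, ha, ?_⟩
    rcases h with ⟨c0, hb1, hb2, hlt, he1, he2⟩ | ⟨r0, hb1, hb2, hlt, he1, he2⟩
    · exact Or.inl ⟨c0, ⟨by omega, by omega⟩, hlt, he1, he2⟩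
    · exact Or.inr ⟨r0, ⟨by omega, by omega⟩, hlt, he1, he2⟩

lemma B_iff (b : List (List Int)) :
    has_one_step_match_alt b = true ↔
      pvHM b b.length (b.headD []).length ∨
      ∃ r, r < b.length ∧ ∃ c, c < (b.headD []).length ∧
        ((c + 1 < (b.headD []).length ∧ pvCW b b.length (b.headD []).length r c r (c + 1)) ∨
         (r + 1 < b.length ∧ pvCW b b.length (b.headD []).length r c (r + 1) c)) := by
  simp only [has_one_step_match_alt, Bool.or_eq_true, List.any_eq_true, List.mem_range,
    Bool.and_eq_true, decide_eq_true_eq, beq_iff_eq, creates_iff, pvHM, pvAt, pvGetA]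
  constructor
  · rintro ((⟨r, hr, c, hc, h1, h2⟩ | ⟨c, hc, r, hr, h1, h2⟩) | ⟨r, hr, c, hc, h⟩)
    · exact Or.inl (Or.inl ⟨r, hr, c, by omega, h1, h2⟩)
    · exact Or.inl (Or.inr ⟨c, hc, r, by omega, h1, h2⟩)
    · exact Or.inr ⟨r, hr, c, hc, h⟩
  · rintro ((⟨r, hr, c, hc, h1, h2⟩ | ⟨c, hc, r, hr, h1, h2⟩) | ⟨r, hr, c, hc, h⟩)
    · exact Or.inl (Or.inl ⟨r, hr, c, by omega, h1, h2⟩)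
    · exact Or.inl (Or.inr ⟨c, hc, r, by omega, h1, h2⟩)
    · exact Or.inr ⟨r, hr, c, hc, h⟩

lemma pvCell_symm (b : List (List Int)) (r c pr pc qr qc : Nat)
    (hne : (pr, pc) ≠ (qr, qc)) :
    pvCell b r c pr pc qr qc = pvCell b r c qr qc pr pc := by
  unfold pvCell
  split_ifs with h1 h2 h2 <;> try rfl
  exfalso
  apply hne
  rcases h1 with ⟨rfl, rfl⟩
  rcases h2 with ⟨rfl, rfl⟩
  rfl

lemma cw_symm (b : List (List Int)) (R C pr pc qr qc : Nat)
    (hne : (pr, pc) ≠ (qr, qc)) :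
    pvCW b R C pr pc qr qc ↔ pvCW b R C qr qc pr pc := by
  have hsymm : ∀ r c, pvCell b r c pr pc qr qc = pvCell b r c qr qc pr pc :=
    fun r c => pvCell_symm b r c pr pc qr qc hne
  unfold pvCW
  simp only [hsymm]
  constructor <;> rintro ⟨a, ha, h⟩ <;> refine ⟨a, ?_, h⟩ <;>
    simp only [List.mem_cons, List.not_mem_nil, or_false] at ha ⊢ <;> tauto

lemma key (b : List (List Int)) (pr pc qr qc : Nat)
    (hpre : Pre_has_one_step_match b)
    (hpr : pr < b.length) (hpc : pc < (b.headD []).length)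
    (hqr : qr < b.length) (hqc : qc < (b.headD []).length)
    (hne : (pr, pc) ≠ (qr, qc))
    (hnm : ¬ pvHM b b.length (b.headD []).length) :
    pvChk (pvSwap b pr pc qr qc) ↔ pvCW b b.length (b.headD []).length pr pc qr qc := by
  unfold pvChk
  rw [check_pos_iff, pvSwap_length, pvSwap_head_length]
  have hget : ∀ r c, pvGetA (pvSwap b pr pc qr qc) r c = pvCell b r c pr pc qr qc :=
    fun r c => pvSwap_get b pr pc qr qc r c hpre hpr hpc hqr hqc hne
  unfold pvHM
  simp only [hget]
  constructor
  · rintro (⟨r, hr, c, hc, h1, h2⟩ | ⟨c, hc, r, hr, h1, h2⟩)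
    · by_cases hp : r = pr ∧ (pc = c ∨ pc = c + 1 ∨ pc = c + 2)
      · obtain ⟨rfl, hpd⟩ := hp
        exact ⟨(r, pc), by simp, Or.inl ⟨c, by omega, by omega, hc, h1, h2⟩⟩
      · by_cases hq : r = qr ∧ (qc = c ∨ qc = c + 1 ∨ qc = c + 2)
        · obtain ⟨rfl, hqd⟩ := hq
          exact ⟨(r, qc), by simp, Or.inl ⟨c, by omega, by omega, hc, h1, h2⟩⟩
        · exfalso
          apply hnm
          have e : ∀ x, x = c ∨ x = c + 1 ∨ x = c + 2 →
              pvCell b r x pr pc qr qc = pvGetA b r x := by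
            intro x hx
            unfold pvCell
            rw [if_neg (by rintro ⟨rfl, rfl⟩; tauto), if_neg (by rintro ⟨rfl, rfl⟩; tauto)]
            rfl
          rw [e c (by tauto), e (c + 1) (by tauto)] at h1
          rw [e (c + 1) (by tauto), e (c + 2) (by tauto)] at h2
          exact Or.inl ⟨r, hr, c, hc, h1, h2⟩
    · by_cases hp : c = pc ∧ (pr = r ∨ pr = r + 1 ∨ pr = r + 2)
      · obtain ⟨rfl, hpd⟩ := hp
        exact ⟨(pr, c), by simp, Or.inr ⟨r, by omega, by omega, hr, h1, h2⟩⟩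
      · by_cases hq : c = qc ∧ (qr = r ∨ qr = r + 1 ∨ qr = r + 2)
        · obtain ⟨rfl, hqd⟩ := hq
          exact ⟨(qr, c), by simp, Or.inr ⟨r, by omega, by omega, hr, h1, h2⟩⟩
        · exfalso
          apply hnm
          have e : ∀ x, x = r ∨ x = r + 1 ∨ x = r + 2 →
              pvCell b x c pr pc qr qc = pvGetA b x c := by
            intro x hx
            unfold pvCell
            rw [if_neg (by rintro ⟨rfl, rfl⟩; tauto), if_neg (by rintro ⟨rfl, rfl⟩; tauto)]
            rfl
          rw [e r (by tauto), e (r + 1) (by tauto)] at h1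
          rw [e (r + 1) (by tauto), e (r + 2) (by tauto)] at h2
          exact Or.inr ⟨c, hc, r, hr, h1, h2⟩
  · rintro ⟨a, ha, h⟩
    simp only [List.mem_cons, List.not_mem_nil, or_false] at ha
    rcases ha with rfl | rfl
    · rcases h with ⟨c0, hb1, hb2, hb3, h4, h5⟩ | ⟨r0, hb1, hb2, hb3, h4, h5⟩
      · exact Or.inl ⟨pr, hpr, c0, hb3, h4, h5⟩
      · exact Or.inr ⟨pc, hpc, r0, hb3, h4, h5⟩
    · rcases h with ⟨c0, hb1, hb2, hb3, h4, h5⟩ | ⟨r0, hb1, hb2, hb3, h4, h5⟩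
      · exact Or.inl ⟨qr, hqr, c0, hb3, h4, h5⟩
      · exact Or.inr ⟨qc, hqc, r0, hb3, h4, h5⟩

lemma hm_A_true (b : List (List Int)) (hpre : Pre_has_one_step_match b)
    (hm : pvHM b b.length (b.headD []).length) :
    ∃ r, r < b.length ∧ ∃ c, c < (b.headD []).length ∧
      ((1 ≤ r ∧ pvChk (pvSwap b r c (r - 1) c)) ∨
       (r + 1 < b.length ∧ pvChk (pvSwap b r c (r + 1) c)) ∨
       (1 ≤ c ∧ pvChk (pvSwap b r c r (c - 1))) ∨
       (c + 1 < (b.headD []).length ∧ pvChk (pvSwap b r c r (c + 1)))) := by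
  rcases hm with ⟨r, hr, c, hc, h1, h2⟩ | ⟨c, hc, r, hr, h1, h2⟩
  · refine ⟨r, hr, c, by omega, Or.inr (Or.inr (Or.inr ⟨by omega, ?_⟩))⟩
    have hb : pvSwap b r c r (c + 1) = b := by
      have hlen : c + 1 < (b.getD r []).length :=
        lt_of_lt_of_le (by omega) (pre_row_len b hpre r hr)
      simp only [pvSwap]
      have e1 : (b.getD r []).set c (pvGetA b r (c + 1)) = b.getD r [] := by
        rw [← h1]; exact set_getD_self _ _ _ (by omega)
      rw [e1, set_getD_self _ _ _ hr]
      have e2 : (b.getD r []).set (c + 1) (pvGetA b r c) = b.getD r [] := by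
        rw [h1]; exact set_getD_self _ _ _ hlen
      rw [e2, set_getD_self _ _ _ hr]
    unfold pvChk
    rw [hb, check_pos_iff]
    exact Or.inl ⟨r, hr, c, hc, h1, h2⟩
  · refine ⟨r, by omega, c, hc, Or.inr (Or.inl ⟨by omega, ?_⟩)⟩
    have hb : pvSwap b r c (r + 1) c = b := by
      have hl1 : c < (b.getD r []).length :=
        lt_of_lt_of_le hc (pre_row_len b hpre r (by omega))
      have hl2 : c < (b.getD (r + 1) []).length :=
        lt_of_lt_of_le hc (pre_row_len b hpre (r + 1) (by omega))
      simp only [pvSwap]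
      have e1 : (b.getD r []).set c (pvGetA b (r + 1) c) = b.getD r [] := by
        rw [← h1]; exact set_getD_self _ _ _ hl1
      rw [e1, set_getD_self _ _ _ (by omega : r < b.length)]
      have e2 : (b.getD (r + 1) []).set c (pvGetA b r c) = b.getD (r + 1) [] := by
        rw [h1]; exact set_getD_self _ _ _ hl2
      rw [e2, set_getD_self _ _ _ (by omega : r + 1 < b.length)]
    unfold pvChk
    rw [hb, check_pos_iff]
    exact Or.inr ⟨c, hc, r, hr, h1, h2⟩

-- ===== VERDICT (by name: the statement is the Claim_ definition above) =====
theorem has_one_step_match_spec : Claim_equal_has_one_step_match := by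
  intro b hdom hpre
  unfold Spec_has_one_step_match
  have hiff : has_one_step_match b = true ↔ has_one_step_match_alt b = true := by
    rw [A_iff, B_iff]
    by_cases hm : pvHM b b.length (b.headD []).length
    · exact ⟨fun _ => Or.inl hm, fun _ => hm_A_true b hpre hm⟩
    · constructor
      · rintro ⟨r, hr, c, hc, h⟩
        refine Or.inr ?_
        rcases h with ⟨h1, hchk⟩ | ⟨h1, hchk⟩ | ⟨h1, hchk⟩ | ⟨h1, hchk⟩
        · have hk := (key b r c (r - 1) c hpre hr hc (by omega) hc
            (by simp only [ne_eq, Prod.mk.injEq, not_and]; omega) hm).mp hchk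
          have hk2 := (cw_symm b _ _ r c (r - 1) c (by simp only [ne_eq, Prod.mk.injEq, not_and]; omega)).mp hk
          refine ⟨r - 1, by omega, c, hc, Or.inr ⟨by omega, ?_⟩⟩
          have e : r - 1 + 1 = r := by omega
          rw [e]
          exact hk2
        · exact ⟨r, hr, c, hc, Or.inr ⟨h1, (key b r c (r + 1) c hpre hr hc h1 hc
            (by simp only [ne_eq, Prod.mk.injEq, not_and]; omega) hm).mp hchk⟩⟩
        · have hk := (key b r c r (c - 1) hpre hr hc hr (by omega)
            (by simp only [ne_eq, Prod.mk.injEq, not_and]; omega) hm).mp hchk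
          have hk2 := (cw_symm b _ _ r c r (c - 1) (by simp only [ne_eq, Prod.mk.injEq, not_and]; omega)).mp hk
          refine ⟨r, hr, c - 1, by omega, Or.inl ⟨by omega, ?_⟩⟩
          have e : c - 1 + 1 = c := by omega
          rw [e]
          exact hk2
        · exact ⟨r, hr, c, hc, Or.inl ⟨h1, (key b r c r (c + 1) hpre hr hc hr h1
            (by simp only [ne_eq, Prod.mk.injEq, not_and]; omega) hm).mp hchk⟩⟩
      · rintro (hm' | ⟨r, hr, c, hc, ⟨h1, hcw⟩ | ⟨h1, hcw⟩⟩)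
        · exact absurd hm' hm
        · exact ⟨r, hr, c, hc, Or.inr (Or.inr (Or.inr ⟨h1, (key b r c r (c + 1) hpre hr hc hr h1
            (by simp only [ne_eq, Prod.mk.injEq, not_and]; omega) hm).mpr hcw⟩))⟩
        · exact ⟨r, hr, c, hc, Or.inr (Or.inl ⟨h1, (key b r c (r + 1) c hpre hr hc h1 hc
            (by simp only [ne_eq, Prod.mk.injEq, not_and]; omega) hm).mpr hcw⟩)⟩
  cases hA : has_one_step_match b <;> cases hB : has_one_step_match_alt b <;> simp_all
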